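-- pv_equiv track=rewrite | github.com/vanshkhandelwa/resumeprototypebackend | resume_analyzer.py | _extract_section_content
-- ===== SOURCE A (Python) =====
-- def _extract_section_content(resume_text):
--     """Extract section content from the resume text"""
--     # Dictionary to store section names and their content
--     sections = {}
--
--     # Common resume section headers to look for
--     common_headers = [
--         "summary", "objective", "profile", "about me", "experience", "work experience",
--         "employment history", "education", "skills", "technical skills", "projects",
--         "certifications", "achievements", "publications", "languages", "interests",
--         "volunteer experience", "professional experience", "leadership", "coursework",
--         "contact", "references", "activities", "machine learning", "web development"
--     ]
--
--     # Convert resume text to lowercase for case-insensitive matching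
--     resume_lower = resume_text.lower()
--     lines = resume_text.split('\n')
--
--     current_section = None
--     section_content = []
--
--     # First pass: identify potential section headers
--     for i, line in enumerate(lines):
--         line_lower = line.lower().strip()
--
--         # Check if this line could be a section header
--         is_header = False
--         matched_header = None
--
--         # Check if line matches common headers
--         for header in common_headers:
--             if line_lower == header or line_lower == header + ":" or line_lower.startswith(header + " "):
--                 is_header = True
--                 matched_header = header
--                 break
--
--         # If no exact match but line is capitalized and short, it might be a header
--         if not is_header and len(line.strip()) < 30 and line.strip() and line.strip()[0].isupper():
--             # Check if followed by empty line or content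
--             if i < len(lines) - 1 and lines[i + 1].strip() and not lines[i + 1].strip()[0].isupper():
--                 is_header = True
--                 matched_header = line_lower
--
--         if is_header:
--             # Save previous section if exists
--             if current_section and section_content:
--                 sections[current_section] = "\n".join(section_content)
--
--             # Start new section
--             current_section = matched_header if matched_header else line_lower
--             current_section = current_section.strip(':').strip()
--             section_content = []
--         elif current_section is not None:
--             # Add line to current section
--             section_content.append(line)
--
--     # Save the last section
--     if current_section and section_content:
--         sections[current_section] = "\n".join(section_content)
--
--     # Format section names for consistency
--     formatted_sections = {}
--     for name, content in sections.items():
--         # Clean the section name and format it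
--         clean_name = name.lower().strip().replace(" ", "_")
--         formatted_sections[clean_name] = content.strip()
--
--     return formatted_sections
-- ===== SOURCE B (Python) =====
-- common_headers = [
--     "summary", "objective", "profile", "about me", "experience", "work experience",
--     "employment history", "education", "skills", "technical skills", "projects",
--     "certifications", "achievements", "publications", "languages", "interests",
--     "volunteer experience", "professional experience", "leadership", "coursework",
--     "contact", "references", "activities", "machine learning", "web development"
-- ]
--
--
-- def _classify(lines, i, line):
--     """Return the cleaned section name if line i is a header, else None."""
--     line_lower = line.lower().strip()
--     matched = next((h for h in common_headers
--                     if line_lower == h or line_lower == h + ":" or line_lower.startswith(h + " ")),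
--                    None)
--     if matched is None:
--         stripped = line.strip()
--         if (len(stripped) < 30 and stripped and stripped[0].isupper()
--                 and i + 1 < len(lines) and lines[i + 1].strip()
--                 and not lines[i + 1].strip()[0].isupper()):
--             matched = line_lower
--     if matched is None:
--         return None
--     return matched.strip(':').strip()
--
--
-- def _extract_section_content(resume_text):
--     lines = resume_text.split('\n')
--     tagged = [(_classify(lines, i, line), line) for i, line in enumerate(lines)]
--     n = len(tagged)
--     j = 0
--     while j < n and tagged[j][0] is None:   # ignore lines before the first header
--         j += 1
--     sections = {}
--     while j < n:
--         name = tagged[j][0]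
--         body = []
--         j += 1
--         while j < n and tagged[j][0] is None:
--             body.append(tagged[j][1])
--             j += 1
--         if name and body:
--             sections[name] = "\n".join(body)
--     return {nm.lower().strip().replace(" ", "_"): c.strip() for nm, c in sections.items()}
-- ===== Notes on version B (the rewrite author's own statement) =====
-- stated objective: alternative
-- what changed: A's single stateful pass (current_section/section_content accumulator with in-loop saves) is replaced by two passes: first classify every line into its cleaned header name or None, then group with a cursor that takes the lines strictly between consecutive headers and joins each non-empty body.
import Mathlib
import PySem

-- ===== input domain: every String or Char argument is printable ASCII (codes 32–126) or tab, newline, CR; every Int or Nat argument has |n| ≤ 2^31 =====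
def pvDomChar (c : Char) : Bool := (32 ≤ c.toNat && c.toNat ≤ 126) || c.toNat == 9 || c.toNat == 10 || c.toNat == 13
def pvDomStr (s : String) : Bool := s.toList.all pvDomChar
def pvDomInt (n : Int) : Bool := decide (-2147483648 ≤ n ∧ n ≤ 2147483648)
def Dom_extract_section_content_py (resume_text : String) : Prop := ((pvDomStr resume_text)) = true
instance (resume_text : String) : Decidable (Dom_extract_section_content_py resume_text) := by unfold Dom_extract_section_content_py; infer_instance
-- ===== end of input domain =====

-- B re-decomposes A's one-pass state machine into two passes (classify every line first,
-- then group bodies between consecutive headers with a cursor); same return value (objective: alternative).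

-- ===== PORT A =====
def pvCommonHeaders : List String :=
  ["summary", "objective", "profile", "about me", "experience", "work experience",
   "employment history", "education", "skills", "technical skills", "projects",
   "certifications", "achievements", "publications", "languages", "interests",
   "volunteer experience", "professional experience", "leadership", "coursework",
   "contact", "references", "activities", "machine learning", "web development"]

-- A's inner `for header in common_headers: … break` loop
def pvFindHeader : List String → String → Option String
  | [], _ => none
  | h :: rest, ll =>
    if ll == h || ll == h ++ ":" || PySem.Str.startswith ll (h ++ " ") then some h
    else pvFindHeader rest ll

-- A's loop body over `enumerate(lines)`: state = (sections, current_section, section_content)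
def pvStepA (lines : List String)
    (st : PySem.Dict String String × Option String × List String)
    (il : Int × String) : PySem.Dict String String × Option String × List String :=
  let i := il.1
  let line := il.2
  let lineLower := PySem.Str.strip (PySem.Str.lower line)
  let stripped := PySem.Str.strip line
  let mh : Option String :=
    match pvFindHeader pvCommonHeaders lineLower with
    | some h => some h
    | none =>
      if PySem.Str.len stripped < 30 && stripped != "" &&
         ((PySem.Str.pyGet? stripped 0).map PySem.Chars.isupper).getD false then
        if decide (i < (lines.length : Int) - 1) &&
           PySem.Str.strip ((PySem.List.pyGet? lines (i + 1)).getD "") != "" &&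
           !(((PySem.Str.pyGet? (PySem.Str.strip ((PySem.List.pyGet? lines (i + 1)).getD "")) 0).map
               PySem.Chars.isupper).getD false) then
          some lineLower
        else none
      else none
  match mh with
  | some m =>
    let sections' :=
      match st.2.1 with
      | some c => if c != "" && !st.2.2.isEmpty
                  then st.1.insert c (PySem.Str.join "\n" st.2.2) else st.1
      | none => st.1
    let cs0 := if m == "" then lineLower else m
    (sections', some (PySem.Str.strip (PySem.Str.stripChars cs0 ":")), ([] : List String))
  | none =>
    match st.2.1 with
    | some _ => (st.1, st.2.1, st.2.2 ++ [line])
    | none => st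

def extract_section_content_py (resume_text : String) : List (String × String) :=
  let lines := (PySem.Str.split? resume_text "\n").getD []
  let st := (PySem.List.enumerate lines).foldl (pvStepA lines)
              (PySem.Dict.empty, none, ([] : List String))
  let sections :=
    match st.2.1 with
    | some c => if c != "" && !st.2.2.isEmpty
                then st.1.insert c (PySem.Str.join "\n" st.2.2) else st.1
    | none => st.1
  (sections.items.foldl
    (fun (d : PySem.Dict String String) (nc : String × String) =>
      d.insert (PySem.Str.replace (PySem.Str.strip (PySem.Str.lower nc.1)) " " "_")
               (PySem.Str.strip nc.2))
    PySem.Dict.empty).items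

-- ===== PORT B =====
-- Source B _classify: cleaned header name of line i, or none
def pvClassify (lines : List String) (i : Int) (line : String) : Option String :=
  let lineLower := PySem.Str.strip (PySem.Str.lower line)
  let matched : Option String :=
    match pvCommonHeaders.find? (fun h =>
        lineLower == h || lineLower == h ++ ":" || PySem.Str.startswith lineLower (h ++ " ")) with
    | some h => some h
    | none =>
      let stripped := PySem.Str.strip line
      if PySem.Str.len stripped < 30 && stripped != "" &&
         ((PySem.Str.pyGet? stripped 0).map PySem.Chars.isupper).getD false &&
         decide (i + 1 < (lines.length : Int)) &&
         PySem.Str.strip ((PySem.List.pyGet? lines (i + 1)).getD "") != "" &&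
         !(((PySem.Str.pyGet? (PySem.Str.strip ((PySem.List.pyGet? lines (i + 1)).getD "")) 0).map
             PySem.Chars.isupper).getD false) then
        some lineLower
      else none
  matched.map (fun m => PySem.Str.strip (PySem.Str.stripChars m ":"))

-- Source B: `while j < n and tagged[j][0] is None: j += 1` (preamble skip)
def pvSkipPre (tagged : List (Option String × String)) (n j : Nat) : Nat :=
  if h : j < n ∧ (tagged.getD j (none, "")).1 = none then pvSkipPre tagged n (j + 1)
  else j
termination_by n - j
decreasing_by omega

-- Source B inner `while j < n and tagged[j][0] is None: body.append(…); j += 1`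
def pvBody (tagged : List (Option String × String)) (n j : Nat) (body : List String) :
    List String × Nat :=
  if h : j < n ∧ (tagged.getD j (none, "")).1 = none then
    pvBody tagged n (j + 1) (body ++ [(tagged.getD j (none, "")).2])
  else (body, j)
termination_by n - j
decreasing_by omega

theorem pvBody_ge (tagged : List (Option String × String)) (n j : Nat) (body : List String) :
    j ≤ (pvBody tagged n j body).2 := by
  unfold pvBody
  split
  · exact Nat.le_trans (Nat.le_succ j) (pvBody_ge tagged n (j + 1) _)
  · exact Nat.le_refl j
termination_by n - j
decreasing_by omega

-- Source B outer `while j < n:` loop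
def pvGroups (tagged : List (Option String × String)) (n j : Nat)
    (sections : PySem.Dict String String) : PySem.Dict String String :=
  if h : j < n then
    let name := (tagged.getD j (none, "")).1
    let bj := pvBody tagged n (j + 1) []
    let sections' :=
      match name with
      | some s => if s != "" && !bj.1.isEmpty
                  then sections.insert s (PySem.Str.join "\n" bj.1) else sections
      | none => sections
    pvGroups tagged n bj.2 sections'
  else sections
termination_by n - j
decreasing_by
  have := pvBody_ge tagged n (j + 1) []
  omega

def extract_section_content_py_alt (resume_text : String) : List (String × String) :=
  let lines := (PySem.Str.split? resume_text "\n").getD []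
  let tagged := (PySem.List.enumerate lines).map (fun il => (pvClassify lines il.1 il.2, il.2))
  let n := tagged.length
  let j := pvSkipPre tagged n 0
  let sections := pvGroups tagged n j PySem.Dict.empty
  (sections.items.foldl
    (fun (d : PySem.Dict String String) (nc : String × String) =>
      d.insert (PySem.Str.replace (PySem.Str.strip (PySem.Str.lower nc.1)) " " "_")
               (PySem.Str.strip nc.2))
    PySem.Dict.empty).items

-- ===== PRECONDITION & SPEC =====
def Spec_extract_section_content_py (resume_text : String) (out : List (String × String)) : Prop := out = extract_section_content_py_alt resume_text
instance (resume_text : String) (out : List (String × String)) : Decidable (Spec_extract_section_content_py resume_text out) := by unfold Spec_extract_section_content_py; infer_instance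

-- ===== CLAIM (what is proved, stated in full; the proofs are below) =====
def Claim_equal_extract_section_content_py : Prop := ∀ (resume_text : String), Dom_extract_section_content_py resume_text → Spec_extract_section_content_py resume_text (extract_section_content_py resume_text)

-- ===== LEMMAS AND PROOFS =====

-- save a finished group (the common `if current_section and section_content:` save)
def pvSaveG (d : PySem.Dict String String) (c : String) (body : List String) :
    PySem.Dict String String :=
  if c != "" && !body.isEmpty then d.insert c (PySem.Str.join "\n" body) else d

def pvSaveGO (d : PySem.Dict String String) (c : Option String) (body : List String) :
    PySem.Dict String String :=
  match c with
  | some s => pvSaveG d s body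
  | none => d

-- abstract step: A's loop body once the line is classified
def pvStep (st : PySem.Dict String String × Option String × List String)
    (p : Option String × String) : PySem.Dict String String × Option String × List String :=
  match p.1 with
  | some m => (pvSaveGO st.1 st.2.1 st.2.2, some m, [])
  | none =>
    match st.2.1 with
    | some _ => (st.1, st.2.1, st.2.2 ++ [p.2])
    | none => st

def pvFinish (st : PySem.Dict String String × Option String × List String) :
    PySem.Dict String String :=
  pvSaveGO st.1 st.2.1 st.2.2

def pvFmt (sections : PySem.Dict String String) : List (String × String) :=
  (sections.items.foldl
    (fun (d : PySem.Dict String String) (nc : String × String) =>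
      d.insert (PySem.Str.replace (PySem.Str.strip (PySem.Str.lower nc.1)) " " "_")
               (PySem.Str.strip nc.2))
    PySem.Dict.empty).items

def pvTagNone (p : Option String × String) : Bool := p.1.isNone

-- reference grouping, structural on the tagged list: inside a group (name c, body acc so far)
def pvGgrp2 (c : String) (acc : List String) :
    List (Option String × String) → PySem.Dict String String → PySem.Dict String String
  | [], d => pvSaveG d c acc
  | (none, l) :: r, d => pvGgrp2 c (acc ++ [l]) r d
  | (some m, _) :: r, d => pvGgrp2 m [] r (pvSaveG d c acc)

-- reference grouping: before the first header
def pvGpre : List (Option String × String) → PySem.Dict String String → PySem.Dict String String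
  | [], d => d
  | (none, _) :: r, d => pvGpre r d
  | (some m, _) :: r, d => pvGgrp2 m [] r d

-- B-shaped grouping on a list (group at head, span the body, recurse)
def pvGgrpD : List (Option String × String) → PySem.Dict String String → PySem.Dict String String
  | [], d => d
  | p :: r, d =>
    pvGgrpD (r.dropWhile pvTagNone) (pvSaveGO d p.1 ((r.takeWhile pvTagNone).map (·.2)))
termination_by l => l.length
decreasing_by
  have := List.length_dropWhile_le pvTagNone r
  simp only [List.length_cons]
  omega

-- ---- classify agreement ----
theorem pvFindHeader_eq (hs : List String) (ll : String) :
    pvFindHeader hs ll =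
      hs.find? (fun h => ll == h || ll == h ++ ":" || PySem.Str.startswith ll (h ++ " ")) := by
  induction hs with
  | nil => rfl
  | cons h rest ih =>
    by_cases hc : (ll == h || ll == h ++ ":" || PySem.Str.startswith ll (h ++ " ")) = true
    · rw [List.find?_cons_of_pos (p := fun h => ll == h || ll == h ++ ":" ||
        PySem.Str.startswith ll (h ++ " ")) hc]
      simp only [pvFindHeader, hc, if_true]
    · rw [List.find?_cons_of_neg (p := fun h => ll == h || ll == h ++ ":" ||
        PySem.Str.startswith ll (h ++ " ")) hc]
      simp only [pvFindHeader]
      rw [if_neg hc, ih]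

theorem pvCommonHeaders_ne_empty (h : String) (hm : h ∈ pvCommonHeaders) : (h == "") = false := by
  fin_cases hm <;> decide

theorem pvNestedIf {α : Type} (a b c d e f : Bool) (x : α) :
    (if a && b && c then (if d && e && f then some x else none) else (none : Option α))
      = (if a && b && c && d && e && f then some x else none) := by
  cases a <;> cases b <;> cases c <;> cases d <;> cases e <;> cases f <;> simp

theorem pvStepA_eq (lines : List String)
    (st : PySem.Dict String String × Option String × List String) (il : Int × String) :
    pvStepA lines st il = pvStep st (pvClassify lines il.1 il.2, il.2) := by
  obtain ⟨i, line⟩ := il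
  obtain ⟨d, cur, content⟩ := st
  simp only [pvStepA, pvClassify, pvFindHeader_eq]
  cases hf : (pvCommonHeaders.find? (fun h =>
      PySem.Str.strip (PySem.Str.lower line) == h ||
      PySem.Str.strip (PySem.Str.lower line) == h ++ ":" ||
      PySem.Str.startswith (PySem.Str.strip (PySem.Str.lower line)) (h ++ " "))) with
  | some h =>
    have hne : (h == "") = false :=
      pvCommonHeaders_ne_empty h (List.mem_of_find?_eq_some hf)
    simp only [hne, Bool.false_eq_true, if_false, Option.map_some]
    cases cur <;> rfl
  | none =>
    have hiff : decide (i < (lines.length : Int) - 1) = decide (i + 1 < (lines.length : Int)) :=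
      decide_eq_decide.mpr (by omega)
    simp only [hiff, pvNestedIf]
    by_cases hch : (decide (PySem.Str.len (PySem.Str.strip line) < 30) &&
        PySem.Str.strip line != "" &&
        ((PySem.Str.pyGet? (PySem.Str.strip line) 0).map PySem.Chars.isupper).getD false &&
        decide (i + 1 < (lines.length : Int)) &&
        PySem.Str.strip ((PySem.List.pyGet? lines (i + 1)).getD "") != "" &&
        !(((PySem.Str.pyGet? (PySem.Str.strip ((PySem.List.pyGet? lines (i + 1)).getD "")) 0).map
            PySem.Chars.isupper).getD false)) = true
    · simp only [hch, if_true, ite_self, Option.map_some]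
      cases cur <;> rfl
    · simp only [Bool.not_eq_true] at hch
      simp only [hch, Bool.false_eq_true, if_false, Option.map_none]
      cases cur <;> rfl

-- ---- A-side: the fold equals the structural grouping ----
theorem pvFoldl_ggrp2 (tg : List (Option String × String)) :
    ∀ (c : String) (acc : List String) (d : PySem.Dict String String),
      pvFinish (tg.foldl pvStep (d, some c, acc)) = pvGgrp2 c acc tg d := by
  induction tg with
  | nil => intro c acc d; rfl
  | cons p r ih =>
    intro c acc d
    obtain ⟨t, l⟩ := p
    cases t with
    | none => simpa [pvStep, pvGgrp2] using ih c (acc ++ [l]) d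
    | some m => simpa [pvStep, pvGgrp2] using ih m [] (pvSaveG d c acc)

theorem pvFoldl_gpre (tg : List (Option String × String)) (d : PySem.Dict String String) :
    pvFinish (tg.foldl pvStep (d, none, [])) = pvGpre tg d := by
  induction tg generalizing d with
  | nil => rfl
  | cons p r ih =>
    obtain ⟨t, l⟩ := p
    cases t with
    | none => simpa [pvStep, pvGpre] using ih d
    | some m => simpa [pvStep, pvGpre] using pvFoldl_ggrp2 r m [] d

-- ---- B-side: the cursor loops equal the structural grouping ----
theorem pvTag_true_of (tg : List (Option String × String)) (j : Nat) (hj : j < tg.length)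
    (ht : (tg.getD j (none, "")).1 = none) : pvTagNone tg[j] = true := by
  unfold pvTagNone
  rw [← List.getD_eq_getElem tg (none, "") hj, ht]
  rfl

theorem pvTag_false_of (tg : List (Option String × String)) (j : Nat) (hj : j < tg.length)
    (ht : ¬ (tg.getD j (none, "")).1 = none) : pvTagNone tg[j] = false := by
  unfold pvTagNone
  rw [← List.getD_eq_getElem tg (none, "") hj]
  cases h' : (tg.getD j (none, "")).1 with
  | none => exact absurd h' ht
  | some s => rfl

theorem pvSkipPre_spec (tg : List (Option String × String)) :
    ∀ j, pvSkipPre tg tg.length j = j + ((tg.drop j).takeWhile pvTagNone).length := by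
  intro j
  unfold pvSkipPre
  split
  · next h =>
    obtain ⟨hj, ht⟩ := h
    rw [pvSkipPre_spec tg (j + 1)]
    rw [List.drop_eq_getElem_cons hj, List.takeWhile_cons, pvTag_true_of tg j hj ht]
    simp only [if_true, List.length_cons]
    omega
  · next h =>
    by_cases hj : j < tg.length
    · have ht : ¬ (tg.getD j (none, "")).1 = none := fun hc => h ⟨hj, hc⟩
      rw [List.drop_eq_getElem_cons hj, List.takeWhile_cons, pvTag_false_of tg j hj ht]
      simp
    · have : tg.length ≤ j := by omega
      simp [List.drop_eq_nil_of_le this]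
termination_by j => tg.length - j
decreasing_by omega

theorem pvBody_spec (tg : List (Option String × String)) :
    ∀ j acc, pvBody tg tg.length j acc =
      (acc ++ ((tg.drop j).takeWhile pvTagNone).map (·.2),
       j + ((tg.drop j).takeWhile pvTagNone).length) := by
  intro j acc
  unfold pvBody
  split
  · next h =>
    obtain ⟨hj, ht⟩ := h
    rw [pvBody_spec tg (j + 1)]
    rw [List.drop_eq_getElem_cons hj, List.takeWhile_cons, pvTag_true_of tg j hj ht]
    simp only [if_true, List.length_cons, List.map_cons, Prod.mk.injEq]
    constructor
    · rw [List.getD_eq_getElem tg (none, "") hj]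
      simp
    · omega
  · next h =>
    by_cases hj : j < tg.length
    · have ht : ¬ (tg.getD j (none, "")).1 = none := fun hc => h ⟨hj, hc⟩
      rw [List.drop_eq_getElem_cons hj, List.takeWhile_cons, pvTag_false_of tg j hj ht]
      simp
    · have : tg.length ≤ j := by omega
      simp [List.drop_eq_nil_of_le this]
termination_by j => tg.length - j
decreasing_by omega

theorem pvDropLenTake (l : List (Option String × String)) :
    l.drop (l.takeWhile pvTagNone).length = l.dropWhile pvTagNone := by
  induction l with
  | nil => rfl
  | cons a t ih =>
    by_cases h : pvTagNone a = true
    · simp [List.takeWhile_cons, List.dropWhile_cons, h, ih]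
    · simp [List.takeWhile_cons, List.dropWhile_cons, h]

theorem pvDrop_after_take (tg : List (Option String × String)) (j : Nat) :
    tg.drop (j + 1 + ((tg.drop (j + 1)).takeWhile pvTagNone).length) =
      (tg.drop (j + 1)).dropWhile pvTagNone := by
  rw [← List.drop_drop]
  exact pvDropLenTake (tg.drop (j + 1))

theorem pvGroups_spec (tg : List (Option String × String)) :
    ∀ j d, pvGroups tg tg.length j d = pvGgrpD (tg.drop j) d := by
  intro j d
  unfold pvGroups
  split
  · next hj =>
    rw [pvBody_spec tg (j + 1)]
    have hg := List.getD_eq_getElem tg (none, "") hj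
    rw [List.drop_eq_getElem_cons hj]
    simp only [pvGgrpD, List.nil_append]
    rw [pvGroups_spec tg (j + 1 + ((tg.drop (j + 1)).takeWhile pvTagNone).length) _,
        pvDrop_after_take]
    rw [hg]
    rfl
  · next hj =>
    have : tg.length ≤ j := by omega
    simp [List.drop_eq_nil_of_le this, pvGgrpD]
termination_by j => tg.length - j
decreasing_by
  have hlen := (List.takeWhile_sublist (l := tg.drop (j + 1)) pvTagNone).length_le
  simp only [List.length_drop] at hlen
  omega

-- ---- link the B-shaped grouping to the reference grouping ----
theorem pvGgrp2_eq_ggrpD (r : List (Option String × String)) :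
    ∀ c acc d, pvGgrp2 c acc r d =
      pvGgrpD (r.dropWhile pvTagNone)
        (pvSaveG d c (acc ++ (r.takeWhile pvTagNone).map (·.2))) := by
  induction r with
  | nil => intro c acc d; simp [pvGgrp2, pvGgrpD]
  | cons p r ih =>
    intro c acc d
    obtain ⟨t, l⟩ := p
    cases t with
    | none =>
      rw [show pvGgrp2 c acc ((none, l) :: r) d = pvGgrp2 c (acc ++ [l]) r d from rfl, ih]
      simp [pvTagNone, List.dropWhile_cons, List.takeWhile_cons]
    | some m =>
      rw [show pvGgrp2 c acc ((some m, l) :: r) d = pvGgrp2 m [] r (pvSaveG d c acc) from rfl, ih]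
      simp only [List.dropWhile_cons, List.takeWhile_cons, pvTagNone, Option.isNone_some,
        Bool.false_eq_true, if_false, List.map_nil, List.append_nil, List.nil_append]
      rw [pvGgrpD]
      rfl

theorem pvGgrpD_dropWhile_eq_gpre (tg : List (Option String × String))
    (d : PySem.Dict String String) :
    pvGgrpD (tg.dropWhile pvTagNone) d = pvGpre tg d := by
  induction tg generalizing d with
  | nil => simp [pvGgrpD, pvGpre]
  | cons p r ih =>
    obtain ⟨t, l⟩ := p
    cases t with
    | none => simpa [List.dropWhile_cons, pvTagNone, pvGpre] using ih d
    | some m =>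
      simp only [List.dropWhile_cons, pvTagNone, Option.isNone_some, Bool.false_eq_true,
        if_false, pvGpre]
      rw [pvGgrp2_eq_ggrpD, pvGgrpD]
      simp only [List.nil_append]
      rfl

-- ===== VERDICT (by name: the statement is the Claim_ definition above) =====
theorem extract_section_content_py_spec : Claim_equal_extract_section_content_py := by
  intro resume_text _
  unfold Spec_extract_section_content_py
  show extract_section_content_py resume_text = extract_section_content_py_alt resume_text
  set lines := (PySem.Str.split? resume_text "\n").getD [] with hlines
  set tagged := (PySem.List.enumerate lines).map
    (fun il => (pvClassify lines il.1 il.2, il.2)) with htagged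
  have hA : extract_section_content_py resume_text =
      pvFmt (pvFinish ((PySem.List.enumerate lines).foldl (pvStepA lines)
        (PySem.Dict.empty, none, []))) := rfl
  have hB : extract_section_content_py_alt resume_text =
      pvFmt (pvGroups tagged tagged.length (pvSkipPre tagged tagged.length 0)
        PySem.Dict.empty) := rfl
  rw [hA, hB]
  congr 1
  have hstep : pvStepA lines = fun st il => pvStep st (pvClassify lines il.1 il.2, il.2) := by
    funext st il; exact pvStepA_eq lines st il
  rw [hstep]
  have hfold : (PySem.List.enumerate lines).foldl
      (fun st il => pvStep st (pvClassify lines il.1 il.2, il.2))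
      (PySem.Dict.empty, none, ([] : List String))
      = tagged.foldl pvStep (PySem.Dict.empty, none, ([] : List String)) := by
    rw [htagged, List.foldl_map]
  rw [hfold]
  rw [pvFoldl_gpre tagged PySem.Dict.empty]
  rw [pvSkipPre_spec tagged 0, pvGroups_spec tagged]
  simp only [List.drop_zero, Nat.zero_add]
  rw [pvDropLenTake tagged, pvGgrpD_dropWhile_eq_gpre]
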